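-- pv_equiv track=rewrite | github.com/Hridya-Vasudev/New | list-exercise.py | rotatable
-- ===== SOURCE A (Python) =====
-- def rotatable(lst):
--      if len(lst) < 2:
--         return True
--      for i in range(1, len(lst)):
--         rotated_list = lst[i:] + lst[:i]
--         if rotated_list == lst:
--             return True
--
--      return False
-- ===== SOURCE B (Python) =====
-- def rotatable(lst):
--     n = len(lst)
--     if n < 2:
--         return True
--     for d in range(1, n // 2 + 1):
--         if n % d == 0 and lst[:d] * (n // d) == lst:
--             return True
--     return False
-- ===== Notes on version B (the rewrite author's own statement) =====
-- stated objective: faster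
-- what changed: Instead of comparing every rotation of the list with the original (quadratic), B checks whether the list is a tiling of its length-d prefix for some proper divisor d of n, using the classical fact that a list equals one of its nontrivial rotations iff it is periodic with a proper period dividing n.
import Mathlib
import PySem

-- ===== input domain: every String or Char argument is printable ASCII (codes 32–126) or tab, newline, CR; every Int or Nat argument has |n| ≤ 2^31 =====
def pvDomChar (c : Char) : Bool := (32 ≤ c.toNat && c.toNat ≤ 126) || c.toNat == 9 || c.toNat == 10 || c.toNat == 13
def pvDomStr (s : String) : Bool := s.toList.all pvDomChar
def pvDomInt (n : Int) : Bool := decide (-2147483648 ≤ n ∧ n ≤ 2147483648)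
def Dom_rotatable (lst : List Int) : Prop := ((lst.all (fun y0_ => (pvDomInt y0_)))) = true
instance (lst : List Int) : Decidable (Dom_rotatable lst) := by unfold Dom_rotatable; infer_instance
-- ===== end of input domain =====

-- B replaces A's scan over all n-1 rotations by a periodicity check over the proper
-- divisors of n (a list equals a nontrivial rotation of itself iff it tiles by a
-- prefix whose length properly divides n); objective: faster.

-- ===== PORT A =====
-- lst[i:] + lst[:i] with 0 ≤ i ≤ len(lst) is drop i ++ take i; the for-loop with
-- early `return True` is `any` over range(1, n).
def rotatable (lst : List Int) : Bool :=
  if lst.length < 2 then true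
  else (List.range' 1 (lst.length - 1)).any fun i =>
    lst.drop i ++ lst.take i == lst

-- ===== PORT B =====
-- lst[:d] * (n // d) is flatten (replicate (n / d) (take d lst)); range(1, n//2+1)
-- is range' 1 (n/2).
def rotatable_alt (lst : List Int) : Bool :=
  let n := lst.length
  if n < 2 then true
  else (List.range' 1 (n / 2)).any fun d =>
    n % d == 0 && (List.replicate (n / d) (lst.take d)).flatten == lst

-- ===== PRECONDITION & SPEC =====
def Spec_rotatable (lst : List Int) (out : Bool) : Prop := out = rotatable_alt lst
instance (lst : List Int) (out : Bool) : Decidable (Spec_rotatable lst out) := by unfold Spec_rotatable; infer_instance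

-- ===== CLAIM (what is proved, stated in full; the proofs are below) =====
def Claim_equal_rotatable : Prop := ∀ (lst : List Int), Dom_rotatable lst → Spec_rotatable lst (rotatable lst)

-- ===== LEMMAS AND PROOFS =====
lemma rotate_mul_fix {l : List Int} {i : ℕ} (h : l.rotate i = l) (k : ℕ) :
    l.rotate (k * i) = l := by
  induction k with
  | zero => simp
  | succ k ih => rw [Nat.succ_mul, ← List.rotate_rotate, ih, h]

lemma rotate_gcd_fix {l : List Int} {i : ℕ} (hn : 0 < l.length)
    (hi : 0 < i) (hilt : i < l.length) (h : l.rotate i = l) :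
    l.rotate (Nat.gcd i l.length) = l := by
  set n := l.length with hnn
  set g := Nat.gcd i n with hgg
  -- Bezout: (g:ℤ) = i * u + n * v
  have hb := Nat.gcd_eq_gcd_ab i n
  set u := Nat.gcdA i n
  set v := Nat.gcdB i n
  have hnz : (n:ℤ) ≠ 0 := by exact_mod_cast hn.ne'
  set k : ℕ := (u % n).toNat with hk
  have hk' : (k:ℤ) = u % n := Int.toNat_of_nonneg (Int.emod_nonneg u hnz)
  have hglt : g < n := lt_of_le_of_lt (Nat.le_of_dvd hi (Nat.gcd_dvd_left i n)) hilt
  have hmod : ((k * i : ℕ) : ℤ) % n = ((g : ℕ) : ℤ) := by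
    push_cast [hk']
    rw [Int.mul_emod, Int.emod_emod_of_dvd _ dvd_rfl, ← Int.mul_emod]
    have : u * i = (g:ℤ) - n * v := by rw [hb]; ring
    rw [this, Int.sub_emod, Int.mul_emod_right, sub_zero, Int.emod_emod_of_dvd _ dvd_rfl,
      Int.emod_eq_of_lt (by positivity) (by exact_mod_cast hglt)]
  have hmodn : (k * i) % n = g := by
    have := hmod
    push_cast at this
    exact_mod_cast this
  calc l.rotate g = l.rotate ((k * i) % n) := by rw [hmodn]
    _ = l.rotate (k * i) := List.rotate_mod l _
    _ = l := rotate_mul_fix h k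

-- commuting words: t ++ w = w ++ t with |t| = m·|w| forces t to be the m-fold power of w
lemma comm_tiling (w : List Int) (hw : w ≠ []) :
    ∀ (m : ℕ) (t : List Int), t.length = m * w.length → t ++ w = w ++ t →
      t = (List.replicate m w).flatten := by
  intro m
  induction m with
  | zero => intro t hlen _; simp [List.length_eq_zero_iff.mp (by simpa using hlen)]
  | succ m ih =>
    intro t hlen hcomm
    have hwpos : 0 < w.length := List.length_pos_iff.mpr hw
    have hle : w.length ≤ t.length := by rw [hlen]; nlinarith
    have htake : t.take w.length = w := by
      have h1 : (t ++ w).take w.length = t.take w.length :=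
        List.take_append_of_le_length hle
      have h2 : (w ++ t).take w.length = w := by
        simp [List.take_append_of_le_length (le_refl w.length)]
      rw [hcomm, h2] at h1; exact h1.symm
    have hsplit : t = w ++ t.drop w.length := by
      conv_lhs => rw [← List.take_append_drop w.length t, htake]
    set t' := t.drop w.length with ht'
    have hcomm' : t' ++ w = w ++ t' := by
      have h3 : (w ++ t') ++ w = w ++ (w ++ t') := by rw [← hsplit]; exact hcomm
      simpa [List.append_assoc] using h3
    have hlen' : t'.length = m * w.length := by
      simp [ht', hlen, Nat.succ_mul]
    have := ih t' hlen' hcomm'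
    rw [hsplit, this, List.replicate_succ, List.flatten_cons]

lemma rotate_div_tiling {l : List Int} {g : ℕ} (hg : 0 < g) (hgl : g ≤ l.length)
    (hdvd : g ∣ l.length) (h : l.rotate g = l) :
    (List.replicate (l.length / g) (l.take g)).flatten = l := by
  obtain ⟨c, hc⟩ := hdvd
  have hc1 : 1 ≤ c := by
    rcases Nat.eq_zero_or_pos c with h0 | h1
    · rw [h0, Nat.mul_zero] at hc; omega
    · exact h1
  set w := l.take g with hw
  set t := l.drop g with ht
  have hwlen : w.length = g := by simp [hw, Nat.min_eq_left hgl]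
  have hwne : w ≠ [] := by
    intro hh; rw [hh] at hwlen; simp at hwlen; omega
  have hrot : t ++ w = l := by
    rw [← h, List.rotate_eq_drop_append_take hgl]
  have hcomm : t ++ w = w ++ t := by
    rw [hrot, hw, ht, List.take_append_drop]
  have htlen : t.length = (c - 1) * w.length := by
    simp only [ht, List.length_drop, hwlen, hc]
    cases c with
    | zero => omega
    | succ c => rw [Nat.succ_sub_one, Nat.mul_succ, Nat.add_sub_cancel, Nat.mul_comm]
  have htt := comm_tiling w hwne (c - 1) t htlen hcomm
  have hdiv : l.length / g = c := by rw [hc]; exact Nat.mul_div_cancel_left c hg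
  rw [hdiv]
  have : l = w ++ t := by rw [← hcomm, hrot]
  rw [this, htt]
  have hc' : c = (c - 1) + 1 := by omega
  conv_lhs => rw [hc', List.replicate_succ, List.flatten_cons]

lemma tiling_rotate {l : List Int} {g : ℕ} (hg : 0 < g) (hgl : g ≤ l.length)
    (hdvd : g ∣ l.length)
    (ht : (List.replicate (l.length / g) (l.take g)).flatten = l) :
    l.rotate g = l := by
  obtain ⟨c, hc⟩ := hdvd
  have hc1 : 1 ≤ c := by
    rcases Nat.eq_zero_or_pos c with h0 | h1
    · rw [h0, Nat.mul_zero] at hc; omega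
    · exact h1
  set w := l.take g with hw
  have hwlen : w.length = g := by simp [hw, Nat.min_eq_left hgl]
  have hdiv : l.length / g = c := by rw [hc]; exact Nat.mul_div_cancel_left c hg
  rw [hdiv] at ht
  have hc' : c = (c - 1) + 1 := by omega
  have hl : l = w ++ (List.replicate (c - 1) w).flatten := by
    rw [← ht]
    conv_lhs => rw [hc', List.replicate_succ, List.flatten_cons]
  have hdrop : l.drop g = (List.replicate (c - 1) w).flatten := by
    conv_lhs => rw [hl]
    rw [← hwlen, List.drop_left]
  rw [List.rotate_eq_drop_append_take hgl, hdrop, ← hw]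
  have hstep : (List.replicate (c - 1) w).flatten ++ w
      = (List.replicate ((c - 1) + 1) w).flatten := by
    rw [List.replicate_succ', List.flatten_append]; simp
  rw [hstep, ← hc']
  exact ht

-- ===== VERDICT (by name: the statement is the Claim_ definition above) =====
theorem rotatable_spec : Claim_equal_rotatable := by
  intro lst _
  unfold Spec_rotatable rotatable rotatable_alt
  by_cases hsmall : lst.length < 2
  · simp [hsmall]
  · simp only [hsmall, if_false]
    set n := lst.length with hn
    have hn2 : 2 ≤ n := Nat.not_lt.mp hsmall
    rw [Bool.eq_iff_iff, List.any_eq_true, List.any_eq_true]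
    constructor
    · rintro ⟨i, hmem, hp⟩
      rw [List.mem_range'_1] at hmem
      obtain ⟨hi1, hi2⟩ := hmem
      have hilt : i < n := by omega
      have heq : lst.drop i ++ lst.take i = lst := by simpa using hp
      have hrot : lst.rotate i = lst := by
        rw [List.rotate_eq_drop_append_take (le_of_lt hilt)]; exact heq
      have hgfix := rotate_gcd_fix (l := lst) (by omega) (by omega) hilt hrot
      set g := Nat.gcd i n with hg
      have hgpos : 0 < g := Nat.gcd_pos_of_pos_left n (by omega)
      have hgdvd : g ∣ n := Nat.gcd_dvd_right i n
      have hglt : g < n := lt_of_le_of_lt (Nat.le_of_dvd (by omega) (Nat.gcd_dvd_left i n)) hilt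
      have hghalf : g ≤ n / 2 := by
        obtain ⟨c, hc⟩ := hgdvd
        have hc2 : 2 ≤ c := by nlinarith
        rw [Nat.le_div_iff_mul_le (by omega)]
        nlinarith
      refine ⟨g, ?_, ?_⟩
      · rw [List.mem_range'_1]; omega
      · rw [Bool.and_eq_true, beq_iff_eq, beq_iff_eq]
        exact ⟨Nat.dvd_iff_mod_eq_zero.mp hgdvd,
          rotate_div_tiling hgpos (le_of_lt hglt) hgdvd hgfix⟩
    · rintro ⟨d, hmem, hp⟩
      rw [List.mem_range'_1] at hmem
      obtain ⟨hd1, hd2⟩ := hmem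
      simp only [Bool.and_eq_true, beq_iff_eq] at hp
      obtain ⟨hmod, htile⟩ := hp
      have hdvd : d ∣ n := Nat.dvd_of_mod_eq_zero hmod
      have hdlt : d < n := by
        have := Nat.div_le_self n 2
        omega
      have hrot : lst.rotate d = lst :=
        tiling_rotate (by omega) (le_of_lt hdlt) hdvd htile
      refine ⟨d, ?_, ?_⟩
      · rw [List.mem_range'_1]; omega
      · rw [beq_iff_eq, ← List.rotate_eq_drop_append_take (le_of_lt hdlt)]
        exact hrot
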